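-- pv_equiv track=rewrite | github.com/Balut-moko/procon-grassmaker-archive | atcoder/typical90/typical90_bf/24058250.py | func
-- ===== SOURCE A (Python) =====
-- def func(x):
--     str_x = str(x)
--     res = 0
--     for s in str_x:
--         res += int(s)
--     res += x
--     res %= 10**5
--     return res
-- ===== SOURCE B (Python) =====
-- def func(x):
--     res = 0
--     t = x
--     while t > 0:
--         res += t % 10
--         t //= 10
--     return (res + x) % 10**5
-- ===== Notes on version B (the rewrite author's own statement) =====
-- stated objective: alternative
-- what changed: B computes the digit sum arithmetically with a divide-by-10 loop instead of converting x to a string and parsing each character back to an int.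
import Mathlib
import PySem

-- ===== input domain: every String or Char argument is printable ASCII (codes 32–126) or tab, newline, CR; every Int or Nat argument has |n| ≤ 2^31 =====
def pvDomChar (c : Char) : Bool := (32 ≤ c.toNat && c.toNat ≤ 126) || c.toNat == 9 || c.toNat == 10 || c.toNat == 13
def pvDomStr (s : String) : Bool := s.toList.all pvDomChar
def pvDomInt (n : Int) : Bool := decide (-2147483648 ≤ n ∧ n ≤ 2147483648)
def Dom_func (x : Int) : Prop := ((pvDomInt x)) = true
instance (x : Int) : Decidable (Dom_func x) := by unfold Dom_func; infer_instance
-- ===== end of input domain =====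

-- B replaces A's string conversion with an arithmetic divide-by-10 digit loop (alternative decomposition, same cost).

-- ===== PORT A =====
-- res += int(s): PySem.Int.ofChars? [c]; its none case (the '-' of a negative x) is a
-- ValueError, excluded by Pre_func, so the .getD 0 default is never the value used.
def func (x : Int) : Int :=
  let strX := PySem.Int.toStr x
  let res := strX.toList.foldl (fun r c => r + (PySem.Int.ofChars? [c]).getD 0) 0
  PySem.Int.mod (res + x) 100000

-- ===== PORT B =====
-- while t > 0: res += t % 10; t //= 10
def funcAltLoop (t res : Int) : Int :=
  if h : 0 < t then funcAltLoop (PySem.Int.floordiv t 10) (res + PySem.Int.mod t 10)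
  else res
termination_by t.toNat
decreasing_by
  rw [PySem.Int.floordiv_eq_ediv_of_pos (by norm_num)]
  omega

def func_alt (x : Int) : Int :=
  PySem.Int.mod (funcAltLoop x 0 + x) 100000

-- ===== PRECONDITION & SPEC =====
-- Pre_ excludes x < 0, where A raises ValueError: str(x) starts with '-' and int('-') fails.
def Pre_func (x : Int) : Prop := 0 ≤ x
instance (x : Int) : Decidable (Pre_func x) := by unfold Pre_func; infer_instance
def pvWitness_func : Int := 57

def Spec_func (x : Int) (out : Int) : Prop := out = func_alt x
instance (x : Int) (out : Int) : Decidable (Spec_func x out) := by unfold Spec_func; infer_instance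

-- ===== CLAIM (what is proved, stated in full; the proofs are below) =====
def Claim_equal_func : Prop := ∀ (x : Int), Dom_func x → Pre_func x → Spec_func x (func x)

-- ===== LEMMAS AND PROOFS =====

-- digit sum of a Nat, the common value of both loops
def digitSumZ (n : Nat) : Int := ((Nat.digits 10 n).sum : Int)

lemma ofChars_digitChar (d : Nat) (h : d < 10) :
    PySem.Int.ofChars? [Nat.digitChar d] = some (d : Int) := by
  interval_cases d <;> decide

lemma foldl_toDigits (n : Nat) (r : Int) :
    (Nat.toDigits 10 n).foldl (fun r c => r + (PySem.Int.ofChars? [c]).getD 0) r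
      = r + digitSumZ n := by
  induction n using Nat.strong_induction_on generalizing r with
  | _ n ih =>
    by_cases h : n < 10
    · rw [Nat.toDigits_of_lt_base h]
      simp only [List.foldl_cons, List.foldl_nil, ofChars_digitChar n h]
      rcases Nat.eq_zero_or_pos n with h0 | h0
      · simp [h0, digitSumZ]
      · rw [digitSumZ, Nat.digits_def' (by norm_num) h0]
        simp [Nat.mod_eq_of_lt h, Nat.div_eq_of_lt h]
    · push_neg at h
      rw [Nat.toDigits_of_base_le (by norm_num) h]
      simp only [List.foldl_append, List.foldl_cons, List.foldl_nil]
      rw [ih (n / 10) (by omega) r, ofChars_digitChar (n % 10) (by omega)]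
      rw [digitSumZ, digitSumZ, Nat.digits_def' (by norm_num) (by omega : 0 < n)]
      push_cast [List.sum_cons, Option.getD_some]
      ring

lemma funcAltLoop_eq (n : Nat) (res : Int) :
    funcAltLoop (n : Int) res = res + digitSumZ n := by
  induction n using Nat.strong_induction_on generalizing res with
  | _ n ih =>
    rcases Nat.eq_zero_or_pos n with h0 | h0
    · rw [funcAltLoop]
      simp [h0, digitSumZ]
    · rw [funcAltLoop]
      rw [dif_pos (by exact_mod_cast h0)]
      rw [PySem.Int.floordiv_eq_ediv_of_pos (by norm_num),
          PySem.Int.mod_eq_emod_of_pos (by norm_num)]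
      have h1 : ((n : Int)) / 10 = ((n / 10 : Nat) : Int) := by
        omega
      have h2 : ((n : Int)) % 10 = ((n % 10 : Nat) : Int) := by
        omega
      rw [h1, h2, ih (n / 10) (by omega)]
      rw [digitSumZ, digitSumZ, Nat.digits_def' (by norm_num) h0]
      push_cast [List.sum_cons]
      ring

-- ===== VERDICT (by name: the statement is the Claim_ definition above) =====
theorem func_spec : Claim_equal_func := by
  intro x _ hpre
  unfold Spec_func func func_alt
  dsimp only
  obtain ⟨n, rfl⟩ := Int.eq_ofNat_of_zero_le hpre
  rw [PySem.Int.toList_toStr]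
  have htc : PySem.Int.toChars (n : Int) = Nat.toDigits 10 n := by
    unfold PySem.Int.toChars
    rw [if_neg (by omega)]
    simp
  rw [htc, foldl_toDigits n 0, funcAltLoop_eq n 0]
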